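-- pv_equiv track=rewrite | github.com/bardulah/tennis-prediction-system | telegram-agent/adk-agent/demo_player_matching.py | demo_find_players_by_name
-- ===== SOURCE A (Python) =====
-- from typing import List, Dict
--
-- def demo_find_players_by_name(search_name: str, mock_database: List[str], max_results: int = 5) -> List[Dict[str, str]]:
--     """
--     Demo version of find_players_by_name with mock database.
--     """
--     search_name = search_name.strip().title()
--     matches = []
--
--     # Strategy 1: Exact match
--     for player in mock_database:
--         if player.lower() == search_name.lower():
--             matches.append({"full_name": player, "match_type": "exact"})
--
--     # Strategy 2: Surname match (if search name is likely a surname)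
--     if len(search_name.split()) == 1:
--         for player in mock_database:
--             player_surname = player.split()[-1]  # Get last word
--             if player_surname.lower() == search_name.lower():
--                 matches.append({"full_name": player, "match_type": "surname"})
--
--     # Strategy 3: Partial name match
--     for player in mock_database:
--         if search_name.lower() in player.lower():
--             matches.append({"full_name": player, "match_type": "partial"})
--
--     # Remove duplicates
--     unique_matches = []
--     seen_names = set()
--     for match in matches:
--         if match["full_name"] not in seen_names:
--             unique_matches.append(match)
--             seen_names.add(match["full_name"])
--             if len(unique_matches) >= max_results:
--                 break
--
--     return unique_matches
-- ===== SOURCE B (Python) =====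
-- def demo_find_players_by_name(search_name, mock_database, max_results=5):
--     """One pass over the database: each player is classified once into its
--     best-priority bucket (exact > surname > partial); the buckets are then
--     chained and deduplicated up to max_results."""
--     search = search_name.strip().title()
--     target = search.lower()
--     single_word = len(search.split()) == 1
--     exact, surname, partial = [], [], []
--     for player in mock_database:
--         if player.lower() == target:
--             exact.append({"full_name": player, "match_type": "exact"})
--         elif single_word and player.split()[-1].lower() == target:
--             surname.append({"full_name": player, "match_type": "surname"})
--         elif target in player.lower():
--             partial.append({"full_name": player, "match_type": "partial"})
--     results = []
--     seen = set()
--     for match in exact + surname + partial: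
--         if match["full_name"] not in seen:
--             seen.add(match["full_name"])
--             results.append(match)
--             if len(results) >= max_results:
--                 break
--     return results
-- ===== Notes on version B (the rewrite author's own statement) =====
-- stated objective: faster
-- what changed: A makes three strategy-grouped passes over the database (exact, surname, partial), recomputing search_name.lower() and player.lower() inside every loop iteration, then deduplicates the concatenation; B makes a single classification pass that lowers the search once and assigns each player at most once to its best-priority bucket (exact > surname > partial, via elif), then chains the buckets and deduplicates up to max_results.
import Mathlib
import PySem

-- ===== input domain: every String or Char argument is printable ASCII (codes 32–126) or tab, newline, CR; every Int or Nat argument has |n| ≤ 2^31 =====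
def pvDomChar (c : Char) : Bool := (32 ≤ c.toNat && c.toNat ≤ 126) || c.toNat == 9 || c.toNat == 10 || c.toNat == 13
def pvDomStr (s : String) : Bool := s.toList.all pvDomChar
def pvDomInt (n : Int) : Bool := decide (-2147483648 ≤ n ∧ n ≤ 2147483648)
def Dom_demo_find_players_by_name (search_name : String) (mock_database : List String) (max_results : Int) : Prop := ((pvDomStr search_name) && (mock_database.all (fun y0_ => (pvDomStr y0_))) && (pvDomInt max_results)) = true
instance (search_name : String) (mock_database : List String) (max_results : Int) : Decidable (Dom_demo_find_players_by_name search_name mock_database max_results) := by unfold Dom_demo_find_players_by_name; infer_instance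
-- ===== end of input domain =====

-- B replaces A's three strategy-grouped passes by a single classification pass (exact >
-- surname > partial, via elif) into three buckets, lowering the search once instead of per
-- iteration; objective: faster (measured).

-- str.title() (PySem has no title): exact on ASCII, where "cased" = letter.
def pyTitleGo : Bool → List Char → List Char
  | _, [] => []
  | prev, c :: r =>
    (if PySem.Chars.isalpha c then (if prev then PySem.Chars.lowerChar c else PySem.Chars.upperChar c) else c)
      :: pyTitleGo (PySem.Chars.isalpha c) r

def pyTitle (cs : List Char) : List Char := pyTitleGo false cs

-- ===== PORT A =====
def demo_find_players_by_name (search_name : String) (mock_database : List String) (max_results : Int) : List (List (String × String)) :=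
  let s : List Char := pyTitle (PySem.Chars.strip search_name.toList)
  -- Strategy 1: exact match
  let m1 := mock_database.foldl (fun acc player =>
      if PySem.Chars.lower player.toList == PySem.Chars.lower s then
        acc ++ [[("full_name", player), ("match_type", "exact")]] else acc)
    ([] : List (List (String × String)))
  -- Strategy 2: surname match; player.split()[-1]: none = IndexError, excluded by Pre_
  let m2? : Option (List (List (String × String))) :=
    if (PySem.Chars.split₀ s).length == 1 then
      mock_database.foldl (fun acc player => acc.bind fun l =>
        (PySem.List.pyGet? (PySem.Chars.split₀ player.toList) (-1)).map fun w =>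
          if PySem.Chars.lower w == PySem.Chars.lower s then
            l ++ [[("full_name", player), ("match_type", "surname")]] else l) (some m1)
    else some m1
  match m2? with
  | none => []   -- IndexError (outside Pre_)
  | some m2 =>
    -- Strategy 3: partial match
    let m3 := mock_database.foldl (fun acc player =>
        if PySem.Chars.isIn (PySem.Chars.lower s) (PySem.Chars.lower player.toList) then
          acc ++ [[("full_name", player), ("match_type", "partial")]] else acc) m2
    -- Remove duplicates (break once max_results reached: done flag)
    (m3.foldl (fun (st : List (List (String × String)) × PySem.Set String × Bool) m =>
        if st.2.2 then st
        else if st.2.1.contains ((m.lookup "full_name").getD "") then st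
        else
          (st.1 ++ [m], st.2.1.add ((m.lookup "full_name").getD ""),
            decide (max_results ≤ ((st.1 ++ [m]).length : Int))))
      ([], PySem.Set.empty, false)).1

-- ===== PORT B =====
def demo_find_players_by_name_alt (search_name : String) (mock_database : List String) (max_results : Int) : List (List (String × String)) :=
  let search : List Char := pyTitle (PySem.Chars.strip search_name.toList)
  let target : List Char := PySem.Chars.lower search
  let single_word : Bool := (PySem.Chars.split₀ search).length == 1
  -- one pass: classify each player into its best-priority bucket
  -- player.split()[-1]: none = IndexError, excluded by Pre_
  let buckets? : Option (List (List (String × String)) × List (List (String × String)) × List (List (String × String))) :=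
    mock_database.foldl (fun acc? player => acc?.bind fun acc =>
      if PySem.Chars.lower player.toList == target then
        some (acc.1 ++ [[("full_name", player), ("match_type", "exact")]], acc.2.1, acc.2.2)
      else if single_word then
        (PySem.List.pyGet? (PySem.Chars.split₀ player.toList) (-1)).map fun w =>
          if PySem.Chars.lower w == target then
            (acc.1, acc.2.1 ++ [[("full_name", player), ("match_type", "surname")]], acc.2.2)
          else if PySem.Chars.isIn target (PySem.Chars.lower player.toList) then
            (acc.1, acc.2.1, acc.2.2 ++ [[("full_name", player), ("match_type", "partial")]])
          else acc
      else if PySem.Chars.isIn target (PySem.Chars.lower player.toList) then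
        some (acc.1, acc.2.1, acc.2.2 ++ [[("full_name", player), ("match_type", "partial")]])
      else some acc)
      (some (([], [], []) : List (List (String × String)) × List (List (String × String)) × List (List (String × String))))
  match buckets? with
  | none => []   -- IndexError (outside Pre_)
  | some (ex, sn, pa) =>
    -- chain buckets, dedup up to max_results
    ((ex ++ sn ++ pa).foldl (fun (st : List (List (String × String)) × PySem.Set String × Bool) m =>
        if st.2.2 then st
        else if st.2.1.contains ((m.lookup "full_name").getD "") then st
        else
          (st.1 ++ [m], st.2.1.add ((m.lookup "full_name").getD ""),
            decide (max_results ≤ ((st.1 ++ [m]).length : Int))))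
      ([], PySem.Set.empty, false)).1

-- ===== PRECONDITION & SPEC =====
-- Pre_ excludes exactly the IndexError inputs: when the stripped/titled search is a single
-- word, Python A evaluates player.split()[-1], which raises on an empty/whitespace-only player.
def Pre_demo_find_players_by_name (search_name : String) (mock_database : List String) (max_results : Int) : Prop :=
  (PySem.Chars.split₀ (PySem.Chars.strip search_name.toList)).length = 1 →
    ∀ p ∈ mock_database, PySem.Chars.split₀ p.toList ≠ []
instance (search_name : String) (mock_database : List String) (max_results : Int) : Decidable (Pre_demo_find_players_by_name search_name mock_database max_results) := by unfold Pre_demo_find_players_by_name; infer_instance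

def pvWitness_demo_find_players_by_name : String × List String × Int := ("lee", ["Anna Lee", "Lee Smith", "Bo"], 5)

def Spec_demo_find_players_by_name (search_name : String) (mock_database : List String) (max_results : Int) (out : List (List (String × String))) : Prop := out = demo_find_players_by_name_alt search_name mock_database max_results
instance (search_name : String) (mock_database : List String) (max_results : Int) (out : List (List (String × String))) : Decidable (Spec_demo_find_players_by_name search_name mock_database max_results out) := by unfold Spec_demo_find_players_by_name; infer_instance

-- ===== CLAIM (what is proved, stated in full; the proofs are below) =====
def Claim_equal_demo_find_players_by_name : Prop := ∀ (search_name : String) (mock_database : List String) (max_results : Int), Dom_demo_find_players_by_name search_name mock_database max_results → Pre_demo_find_players_by_name search_name mock_database max_results → Spec_demo_find_players_by_name search_name mock_database max_results (demo_find_players_by_name search_name mock_database max_results)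

-- ===== LEMMAS AND PROOFS =====

-- the shared dedup-loop step (both Pythons run the identical dedup loop)
def pvStep (max_results : Int) (st : List (List (String × String)) × PySem.Set String × Bool) (m : List (String × String)) : List (List (String × String)) × PySem.Set String × Bool :=
  if st.2.2 then st
  else if st.2.1.contains ((m.lookup "full_name").getD "") then st
  else
    (st.1 ++ [m], st.2.1.add ((m.lookup "full_name").getD ""),
      decide (max_results ≤ ((st.1 ++ [m]).length : Int)))

def pvMk (p t : String) : List (String × String) := [("full_name", p), ("match_type", t)]

def pvNm (m : List (String × String)) : String := (m.lookup "full_name").getD ""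

@[simp] lemma pvNm_mk (p t : String) : pvNm (pvMk p t) = p := rfl

-- keep-first-with-seen normal form of a candidate list
def pvKfp (s : PySem.Set String) : List (List (String × String)) → PySem.Set String × List (List (String × String))
  | [] => (s, [])
  | m :: L =>
    if s.contains (pvNm m) then pvKfp s L
    else
      let r := pvKfp (s.add (pvNm m)) L
      (r.1, m :: r.2)

lemma pvStep_done (mr : Int) (st : List (List (String × String)) × PySem.Set String × Bool)
    (L : List (List (String × String))) (h : st.2.2 = true) : List.foldl (pvStep mr) st L = st := by
  induction L with
  | nil => rfl
  | cons m L ih => simpa [pvStep, h] using ih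

lemma pvFoldl_kfp (mr : Int) :
    ∀ (L : List (List (String × String))) (res : List (List (String × String)))
      (seen : PySem.Set String) (done : Bool),
      List.foldl (pvStep mr) (res, seen, done) L = List.foldl (pvStep mr) (res, seen, done) (pvKfp seen L).2 := by
  intro L
  induction L with
  | nil => intro res seen done; rfl
  | cons m L ih =>
    intro res seen done
    by_cases hd : done = true
    · subst hd
      rw [pvStep_done mr _ _ rfl, pvStep_done mr _ _ rfl]
    · replace hd : done = false := by simpa using hd
      subst hd
      by_cases hc : seen.contains (pvNm m) = true
      · simp only [pvKfp, hc, if_true, List.foldl_cons]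
        have hstep : pvStep mr (res, seen, false) m = (res, seen, false) := by
          simp [pvStep, pvNm] at hc ⊢; simp [hc]
        rw [hstep, ih]
      · replace hc : seen.contains (pvNm m) = false := by simpa using hc
        simp only [pvKfp, hc, if_neg Bool.false_ne_true, List.foldl_cons]
        have hstep : pvStep mr (res, seen, false) m
            = (res ++ [m], seen.add (pvNm m), decide (mr ≤ ((res ++ [m]).length : Int))) := by
          simp [pvStep, pvNm] at hc ⊢; simp [hc]
        rw [hstep, ih]

lemma pvKfp_append (X Y : List (List (String × String))) :
    ∀ s, pvKfp s (X ++ Y) = ((pvKfp (pvKfp s X).1 Y).1, (pvKfp s X).2 ++ (pvKfp (pvKfp s X).1 Y).2) := by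
  induction X with
  | nil => intro s; simp [pvKfp]
  | cons m X ih =>
    intro s
    by_cases hc : s.contains (pvNm m) = true
    · simp only [List.cons_append, pvKfp, hc, if_true]; exact ih s
    · replace hc : s.contains (pvNm m) = false := by simpa using hc
      simp only [List.cons_append, pvKfp, hc, if_neg Bool.false_ne_true]
      simp [ih (s.add (pvNm m))]

lemma pvContains_mono (s : PySem.Set String) (x y : String) (h : s.contains x = true) :
    (s.add y).contains x = true := by
  rw [PySem.Set.contains_iff] at h ⊢
  exact (PySem.Set.mem_add s y x).mpr (Or.inl h)

lemma pvKfp_filter (ok : List (String × String) → Bool) :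
    ∀ (L : List (List (String × String))) (s : PySem.Set String),
      (∀ m ∈ L, ok m = false → s.contains (pvNm m) = true) →
      pvKfp s (L.filter ok) = pvKfp s L := by
  intro L
  induction L with
  | nil => intro s _; rfl
  | cons m L ih =>
    intro s h
    by_cases ho : ok m = true
    · rw [List.filter_cons_of_pos ho]
      by_cases hc : s.contains (pvNm m) = true
      · simp only [pvKfp, hc, if_true]
        exact ih s (fun x hx => h x (List.mem_cons_of_mem _ hx))
      · replace hc : s.contains (pvNm m) = false := by simpa using hc
        simp only [pvKfp, hc, if_neg Bool.false_ne_true]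
        have := ih (s.add (pvNm m)) (fun x hx hok => pvContains_mono _ _ _ (h x (List.mem_cons_of_mem _ hx) hok))
        simp [this]
    · replace ho : ok m = false := by simpa using ho
      rw [List.filter_cons_of_neg (by simp [ho])]
      have hc : s.contains (pvNm m) = true := h m (List.mem_cons_self) ho
      simp only [pvKfp, hc, if_true]
      exact ih s (fun x hx => h x (List.mem_cons_of_mem _ hx))

lemma pvMem_kfp_seen (x : String) :
    ∀ (L : List (List (String × String))) (s : PySem.Set String),
      (x ∈ s ∨ x ∈ L.map pvNm) → x ∈ (pvKfp s L).1 := by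
  intro L
  induction L with
  | nil => intro s h; simpa using h.resolve_right (by simp)
  | cons m L ih =>
    intro s h
    by_cases hc : s.contains (pvNm m) = true
    · simp only [pvKfp, hc, if_true]
      apply ih
      rcases h with h | h
      · exact Or.inl h
      · rcases (by simpa using h : x = pvNm m ∨ x ∈ L.map pvNm) with h | h
        · exact Or.inl (h ▸ (PySem.Set.contains_iff s (pvNm m)).mp hc)
        · exact Or.inr h
    · replace hc : s.contains (pvNm m) = false := by simpa using hc
      simp only [pvKfp, hc, if_neg Bool.false_ne_true]
      apply ih
      rcases h with h | h
      · exact Or.inl ((PySem.Set.mem_add _ _ _).mpr (Or.inl h))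
      · rcases (by simpa using h : x = pvNm m ∨ x ∈ L.map pvNm) with h | h
        · exact Or.inl ((PySem.Set.mem_add _ _ _).mpr (Or.inr h))
        · exact Or.inr h

-- the heart: chaining the three A-passes and the three B-buckets dedups identically
lemma pvNames (db' : List String) (tag : String) : (db'.map (pvMk · tag)).map pvNm = db' := by
  simp [List.map_map, Function.comp_def]

-- bucket list as a filter of the pass list
lemma pvBucket_eq_filter (db : List String) (c r : String → Bool) (tag : String) :
    (db.filter (fun a => c a && r a)).map (pvMk · tag)
      = ((db.filter r).map (pvMk · tag)).filter (fun m => c (pvNm m)) := by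
  rw [List.filter_map]
  congr 1
  rw [List.filter_filter]
  apply List.filter_congr
  intro a _
  simp [Function.comp]

lemma pvKfp_three (db : List String) (q1 q2 q3 : String → Bool) :
    pvKfp PySem.Set.empty
      ((db.filter q1).map (pvMk · "exact") ++ ((db.filter q2).map (pvMk · "surname") ++ (db.filter q3).map (pvMk · "partial")))
    = pvKfp PySem.Set.empty
      ((db.filter q1).map (pvMk · "exact") ++ ((db.filter (fun a => !q1 a && q2 a)).map (pvMk · "surname")
        ++ (db.filter (fun a => (!q1 a && !q2 a) && q3 a)).map (pvMk · "partial"))) := by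
  set E := (db.filter q1).map (pvMk · "exact") with hE
  set S := (db.filter q2).map (pvMk · "surname") with hS
  set P := (db.filter q3).map (pvMk · "partial") with hP
  have hmemE : ∀ x, q1 x = true → x ∈ db → x ∈ (pvKfp PySem.Set.empty E).1 := by
    intro x hq hxdb
    apply pvMem_kfp_seen
    right
    rw [hE, pvNames]
    exact List.mem_filter.mpr ⟨hxdb, hq⟩
  have hSS : pvKfp (pvKfp PySem.Set.empty E).1 ((db.filter (fun a => !q1 a && q2 a)).map (pvMk · "surname"))
      = pvKfp (pvKfp PySem.Set.empty E).1 S := by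
    rw [pvBucket_eq_filter db (fun a => !q1 a) q2 "surname", ← hS]
    apply pvKfp_filter
    intro m hm hok
    rcases List.mem_map.mp (hS ▸ hm) with ⟨x, hxf, rfl⟩
    have hq1 : q1 x = true := by simpa using hok
    rw [PySem.Set.contains_iff, pvNm_mk]
    exact hmemE x hq1 (List.mem_filter.mp hxf).1
  have hmemS : ∀ x, (q1 x = true ∨ q2 x = true) → x ∈ db → x ∈ (pvKfp (pvKfp PySem.Set.empty E).1 S).1 := by
    intro x hq hxdb
    apply pvMem_kfp_seen
    rcases hq with hq | hq
    · exact Or.inl (hmemE x hq hxdb)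
    · right; rw [hS, pvNames]; exact List.mem_filter.mpr ⟨hxdb, hq⟩
  have hPP : pvKfp (pvKfp (pvKfp PySem.Set.empty E).1 S).1
        ((db.filter (fun a => (!q1 a && !q2 a) && q3 a)).map (pvMk · "partial"))
      = pvKfp (pvKfp (pvKfp PySem.Set.empty E).1 S).1 P := by
    rw [pvBucket_eq_filter db (fun a => !q1 a && !q2 a) q3 "partial", ← hP]
    apply pvKfp_filter
    intro m hm hok
    rcases List.mem_map.mp (hP ▸ hm) with ⟨x, hxf, rfl⟩
    have hq : q1 x = true ∨ q2 x = true := by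
      cases hq1 : q1 x with
      | true => exact Or.inl rfl
      | false =>
        cases hq2 : q2 x with
        | true => exact Or.inr rfl
        | false => simp [hq1, hq2] at hok
    rw [PySem.Set.contains_iff, pvNm_mk]
    exact hmemS x hq (List.mem_filter.mp hxf).1
  rw [pvKfp_append E, pvKfp_append E,
      pvKfp_append S, pvKfp_append ((db.filter (fun a => !q1 a && q2 a)).map (pvMk · "surname")),
      hSS, hPP]

-- evaluation lemmas for the ports
lemma pvLastSome (xs : List (List Char)) (h : xs ≠ []) :
    PySem.List.pyGet? xs (-1) = some ((PySem.List.pyGet? xs (-1)).getD []) := by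
  have hl : 1 ≤ xs.length := List.length_pos_iff.mpr h
  simp [PySem.List.pyGet?, PySem.List.pyIdx?, hl,
    List.getElem?_eq_getElem (by omega : xs.length - 1 < xs.length)]

def pvLast (x : String) : List Char := (PySem.List.pyGet? (PySem.Chars.split₀ x.toList) (-1)).getD []

lemma pvA_surn (t : List Char) :
    ∀ (db : List String), (∀ x ∈ db, PySem.Chars.split₀ x.toList ≠ []) →
    ∀ (init : List (List (String × String))),
      db.foldl (fun acc player => acc.bind fun l =>
        (PySem.List.pyGet? (PySem.Chars.split₀ player.toList) (-1)).map fun w =>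
          if PySem.Chars.lower w == t then
            l ++ [[("full_name", player), ("match_type", "surname")]] else l) (some init)
      = some (init ++ (db.filter (fun x => PySem.Chars.lower (pvLast x) == t)).map (pvMk · "surname")) := by
  intro db
  induction db with
  | nil => intro _ init; simp
  | cons x db ih =>
    intro h init
    have hx : PySem.Chars.split₀ x.toList ≠ [] := h x List.mem_cons_self
    rw [List.foldl_cons]
    have hstep : (some init).bind (fun l =>
        (PySem.List.pyGet? (PySem.Chars.split₀ x.toList) (-1)).map fun w =>
          if PySem.Chars.lower w == t then
            l ++ [[("full_name", x), ("match_type", "surname")]] else l)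
        = some (if PySem.Chars.lower (pvLast x) == t then
            init ++ [[("full_name", x), ("match_type", "surname")]] else init) := by
      rw [Option.bind_some, pvLastSome _ hx, Option.map_some]
      rfl
    rw [hstep]
    by_cases hm : (PySem.Chars.lower (pvLast x) == t) = true
    · rw [if_pos hm, ih (fun y hy => h y (List.mem_cons_of_mem _ hy))]
      rw [show List.filter (fun x => PySem.Chars.lower (pvLast x) == t) (x :: db)
            = x :: List.filter (fun x => PySem.Chars.lower (pvLast x) == t) db from List.filter_cons_of_pos hm]
      simp [pvMk]
    · replace hm : (PySem.Chars.lower (pvLast x) == t) = false := by simpa using hm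
      rw [if_neg (by simp [hm]), ih (fun y hy => h y (List.mem_cons_of_mem _ hy))]
      rw [show List.filter (fun x => PySem.Chars.lower (pvLast x) == t) (x :: db)
            = List.filter (fun x => PySem.Chars.lower (pvLast x) == t) db from List.filter_cons_of_neg (by simp [hm])]

def pvBStep (t : List Char) (sw : Bool)
    (acc? : Option (List (List (String × String)) × List (List (String × String)) × List (List (String × String))))
    (player : String) :
    Option (List (List (String × String)) × List (List (String × String)) × List (List (String × String))) :=
  acc?.bind fun acc =>
    if PySem.Chars.lower player.toList == t then
      some (acc.1 ++ [[("full_name", player), ("match_type", "exact")]], acc.2.1, acc.2.2)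
    else if sw then
      (PySem.List.pyGet? (PySem.Chars.split₀ player.toList) (-1)).map fun w =>
        if PySem.Chars.lower w == t then
          (acc.1, acc.2.1 ++ [[("full_name", player), ("match_type", "surname")]], acc.2.2)
        else if PySem.Chars.isIn t (PySem.Chars.lower player.toList) then
          (acc.1, acc.2.1, acc.2.2 ++ [[("full_name", player), ("match_type", "partial")]])
        else acc
    else if PySem.Chars.isIn t (PySem.Chars.lower player.toList) then
      some (acc.1, acc.2.1, acc.2.2 ++ [[("full_name", player), ("match_type", "partial")]])
    else some acc

lemma pvB_fold_true (t : List Char) :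
    ∀ (db : List String), (∀ x ∈ db, PySem.Chars.split₀ x.toList ≠ []) →
    ∀ e s p,
      db.foldl (pvBStep t true) (some (e, s, p))
      = some (e ++ (db.filter (fun x => PySem.Chars.lower x.toList == t)).map (pvMk · "exact"),
              s ++ (db.filter (fun x => !(PySem.Chars.lower x.toList == t) && (PySem.Chars.lower (pvLast x) == t))).map (pvMk · "surname"),
              p ++ (db.filter (fun x => (!(PySem.Chars.lower x.toList == t) && !(PySem.Chars.lower (pvLast x) == t)) && PySem.Chars.isIn t (PySem.Chars.lower x.toList))).map (pvMk · "partial")) := by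
  intro db
  induction db with
  | nil => intro _ e s p; simp
  | cons x db ih =>
    intro h e s p
    have hx : PySem.Chars.split₀ x.toList ≠ [] := h x List.mem_cons_self
    have ih' := ih (fun y hy => h y (List.mem_cons_of_mem _ hy))
    rw [List.foldl_cons]
    by_cases hpe : (PySem.Chars.lower x.toList == t) = true
    · have hstep : pvBStep t true (some (e, s, p)) x
          = some (e ++ [[("full_name", x), ("match_type", "exact")]], s, p) := by
        simp [pvBStep, hpe]
      rw [hstep, ih']
      simp [hpe, pvMk]
    · replace hpe : (PySem.Chars.lower x.toList == t) = false := by simpa using hpe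
      by_cases hps : (PySem.Chars.lower (pvLast x) == t) = true
      · have hstep : pvBStep t true (some (e, s, p)) x
            = some (e, s ++ [[("full_name", x), ("match_type", "surname")]], p) := by
          simp only [pvBStep, Option.bind_some, hpe, Bool.false_eq_true, if_false,
            if_true]
          rw [pvLastSome _ hx, Option.map_some]
          simp [pvLast] at hps
          simp [hps]
        rw [hstep, ih']
        simp [hpe, hps, pvMk]
      · replace hps : (PySem.Chars.lower (pvLast x) == t) = false := by simpa using hps
        by_cases hpi : PySem.Chars.isIn t (PySem.Chars.lower x.toList) = true
        · have hstep : pvBStep t true (some (e, s, p)) x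
              = some (e, s, p ++ [[("full_name", x), ("match_type", "partial")]]) := by
            simp only [pvBStep, Option.bind_some, hpe, Bool.false_eq_true, if_false, if_true]
            rw [pvLastSome _ hx, Option.map_some]
            simp [pvLast] at hps
            simp [hps, hpi]
          rw [hstep, ih']
          simp [hpe, hps, hpi, pvMk]
        · replace hpi : PySem.Chars.isIn t (PySem.Chars.lower x.toList) = false := by simpa using hpi
          have hstep : pvBStep t true (some (e, s, p)) x = some (e, s, p) := by
            simp only [pvBStep, Option.bind_some, hpe, Bool.false_eq_true, if_false, if_true]
            rw [pvLastSome _ hx, Option.map_some]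
            simp [pvLast] at hps
            simp [hps, hpi]
          rw [hstep, ih']
          simp [hpe, hps, hpi]

lemma pvB_fold_false (t : List Char) :
    ∀ (db : List String) (e s p : List (List (String × String))),
      db.foldl (pvBStep t false) (some (e, s, p))
      = some (e ++ (db.filter (fun x => PySem.Chars.lower x.toList == t)).map (pvMk · "exact"),
              s,
              p ++ (db.filter (fun x => !(PySem.Chars.lower x.toList == t) && PySem.Chars.isIn t (PySem.Chars.lower x.toList))).map (pvMk · "partial")) := by
  intro db
  induction db with
  | nil => intro e s p; simp
  | cons x db ih =>
    intro e s p
    rw [List.foldl_cons]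
    by_cases hpe : (PySem.Chars.lower x.toList == t) = true
    · have hstep : pvBStep t false (some (e, s, p)) x
          = some (e ++ [[("full_name", x), ("match_type", "exact")]], s, p) := by
        simp [pvBStep, hpe]
      rw [hstep, ih]
      simp [hpe, pvMk]
    · replace hpe : (PySem.Chars.lower x.toList == t) = false := by simpa using hpe
      by_cases hpi : PySem.Chars.isIn t (PySem.Chars.lower x.toList) = true
      · have hstep : pvBStep t false (some (e, s, p)) x
            = some (e, s, p ++ [[("full_name", x), ("match_type", "partial")]]) := by
          simp [pvBStep, hpe, hpi]
        rw [hstep, ih]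
        simp [hpe, hpi, pvMk]
      · replace hpi : PySem.Chars.isIn t (PySem.Chars.lower x.toList) = false := by simpa using hpi
        have hstep : pvBStep t false (some (e, s, p)) x = some (e, s, p) := by
          simp [pvBStep, hpe, hpi]
        rw [hstep, ih]
        simp [hpe, hpi]

lemma pvB_fold_true' (t : List Char) :
    ∀ (db : List String), (∀ x ∈ db, PySem.Chars.split₀ x.toList ≠ []) →
    ∀ e s p,
      db.foldl (fun acc? player => acc?.bind fun acc =>
        if PySem.Chars.lower player.toList == t then
          some (acc.1 ++ [[("full_name", player), ("match_type", "exact")]], acc.2.1, acc.2.2)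
        else
          (PySem.List.pyGet? (PySem.Chars.split₀ player.toList) (-1)).map fun w =>
            if PySem.Chars.lower w == t then
              (acc.1, acc.2.1 ++ [[("full_name", player), ("match_type", "surname")]], acc.2.2)
            else if PySem.Chars.isIn t (PySem.Chars.lower player.toList) then
              (acc.1, acc.2.1, acc.2.2 ++ [[("full_name", player), ("match_type", "partial")]])
            else acc) (some (e, s, p))
      = some (e ++ (db.filter (fun x => PySem.Chars.lower x.toList == t)).map (pvMk · "exact"),
              s ++ (db.filter (fun x => !(PySem.Chars.lower x.toList == t) && (PySem.Chars.lower (pvLast x) == t))).map (pvMk · "surname"),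
              p ++ (db.filter (fun x => (!(PySem.Chars.lower x.toList == t) && !(PySem.Chars.lower (pvLast x) == t)) && PySem.Chars.isIn t (PySem.Chars.lower x.toList))).map (pvMk · "partial")) := by
  intro db h e s p
  exact pvB_fold_true t db h e s p

lemma pvB_fold_false' (t : List Char) :
    ∀ (db : List String) (e s p : List (List (String × String))),
      db.foldl (fun acc? player => acc?.bind fun acc =>
        if PySem.Chars.lower player.toList == t then
          some (acc.1 ++ [[("full_name", player), ("match_type", "exact")]], acc.2.1, acc.2.2)
        else if PySem.Chars.isIn t (PySem.Chars.lower player.toList) then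
          some (acc.1, acc.2.1, acc.2.2 ++ [[("full_name", player), ("match_type", "partial")]])
        else some acc) (some (e, s, p))
      = some (e ++ (db.filter (fun x => PySem.Chars.lower x.toList == t)).map (pvMk · "exact"),
              s,
              p ++ (db.filter (fun x => !(PySem.Chars.lower x.toList == t) && PySem.Chars.isIn t (PySem.Chars.lower x.toList))).map (pvMk · "partial")) := by
  intro db e s p
  exact pvB_fold_false t db e s p

lemma pvDedup_eq (mr : Int) (L L' : List (List (String × String)))
    (h : pvKfp PySem.Set.empty L = pvKfp PySem.Set.empty L') :
    (List.foldl (pvStep mr) ([], PySem.Set.empty, false) L).1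
      = (List.foldl (pvStep mr) ([], PySem.Set.empty, false) L').1 := by
  rw [pvFoldl_kfp mr L, pvFoldl_kfp mr L', h]

-- title()/word-count bridge: Pre_ is stated on strip(search_name); the ports split the titled string
lemma char_toNat_of_le (a c : Char) (h : a ≤ c) : a.toNat ≤ c.toNat := by
  rw [Char.le_def] at h; exact h

lemma isupper_toNat (c : Char) (h : PySem.Chars.isupper c = true) :
    65 ≤ c.toNat ∧ c.toNat ≤ 90 := by
  simp only [PySem.Chars.isupper, Bool.and_eq_true, decide_eq_true_eq] at h
  have h1 := char_toNat_of_le _ _ h.1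
  have h2 := char_toNat_of_le _ _ h.2
  have e1 : ('A' : Char).toNat = 65 := by decide
  have e2 : ('Z' : Char).toNat = 90 := by decide
  omega

lemma islower_toNat (c : Char) (h : PySem.Chars.islower c = true) :
    97 ≤ c.toNat ∧ c.toNat ≤ 122 := by
  simp only [PySem.Chars.islower, Bool.and_eq_true, decide_eq_true_eq] at h
  have h1 := char_toNat_of_le _ _ h.1
  have h2 := char_toNat_of_le _ _ h.2
  have e1 : ('a' : Char).toNat = 97 := by decide
  have e2 : ('z' : Char).toNat = 122 := by decide
  omega

lemma isspace_toNat (c : Char) (h : 33 ≤ c.toNat ∧ c.toNat ≤ 126) :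
    PySem.Chars.isspace c = false := by
  simp [PySem.Chars.isspace]
  omega

lemma isspace_lowerChar' (c : Char) (h : PySem.Chars.isalpha c = true) (b : Bool) :
    PySem.Chars.isspace (if b then PySem.Chars.lowerChar c else PySem.Chars.upperChar c)
      = PySem.Chars.isspace c := by
  rcases (by simpa [PySem.Chars.isalpha] using h :
      PySem.Chars.isupper c = true ∨ PySem.Chars.islower c = true) with hu | hl
  · obtain ⟨h1, h2⟩ := isupper_toNat c hu
    have hlow : PySem.Chars.islower c = false := by
      by_contra hcon
      replace hcon : PySem.Chars.islower c = true := by simpa using hcon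
      obtain ⟨h3, _⟩ := islower_toNat c hcon
      omega
    have hv : (c.toNat + 32).isValidChar := Or.inl (by omega)
    have ht : (Char.ofNat (c.toNat + 32)).toNat = c.toNat + 32 := by
      rw [Char.toNat_ofNat, if_pos hv]
    have hsc : PySem.Chars.isspace c = false := isspace_toNat c ⟨by omega, by omega⟩
    cases b
    · simp [PySem.Chars.upperChar, hlow, hsc]
    · simp only [if_true, PySem.Chars.lowerChar, hu]
      rw [hsc, isspace_toNat _ (by rw [ht]; omega)]
  · obtain ⟨h1, h2⟩ := islower_toNat c hl
    have hup : PySem.Chars.isupper c = false := by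
      by_contra hcon
      replace hcon : PySem.Chars.isupper c = true := by simpa using hcon
      obtain ⟨_, h3⟩ := isupper_toNat c hcon
      omega
    have hv : (c.toNat - 32).isValidChar := Or.inl (by omega)
    have ht : (Char.ofNat (c.toNat - 32)).toNat = c.toNat - 32 := by
      rw [Char.toNat_ofNat, if_pos hv]
    have hsc : PySem.Chars.isspace c = false := isspace_toNat c ⟨by omega, by omega⟩
    cases b
    · simp only [Bool.false_eq_true, if_false, PySem.Chars.upperChar, hl, if_true]
      rw [hsc, isspace_toNat _ (by rw [ht]; omega)]
    · simp [PySem.Chars.lowerChar, hup, hsc]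

lemma title_space_profile : ∀ (b : Bool) (cs : List Char),
    List.Forall₂ (fun a d => PySem.Chars.isspace a = PySem.Chars.isspace d) (pyTitleGo b cs) cs := by
  intro b cs
  induction cs generalizing b with
  | nil => exact List.Forall₂.nil
  | cons c r ih =>
    refine List.Forall₂.cons ?_ (ih _)
    by_cases ha : PySem.Chars.isalpha c = true
    · simpa [ha] using isspace_lowerChar' c ha b
    · replace ha : PySem.Chars.isalpha c = false := by simpa using ha
      simp [ha]

lemma split₀go_len :
    ∀ {cs ds : List Char},
      List.Forall₂ (fun a d => PySem.Chars.isspace a = PySem.Chars.isspace d) cs ds →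
      ∀ (cur cur' : List Char) (acc acc' : List (List Char)),
        cur.isEmpty = cur'.isEmpty → acc.length = acc'.length →
        (PySem.Chars.split₀.go cs cur acc).length = (PySem.Chars.split₀.go ds cur' acc').length := by
  intro cs ds h
  induction h with
  | nil =>
    intro cur cur' acc acc' hc hl
    simp only [PySem.Chars.split₀.go, ← hc]
    by_cases he : cur.isEmpty = true
    · simp [he, hl]
    · replace he : cur.isEmpty = false := by simpa using he
      simp [he, hl]
  | @cons a b as bs hcd htail ih =>
    intro cur cur' acc acc' hc hl
    simp only [PySem.Chars.split₀.go, ← hcd]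
    by_cases hsp : PySem.Chars.isspace a = true
    · simp only [hsp, if_true]
      by_cases he : cur.isEmpty = true
      · rw [← hc, he]
        simp only [if_true]
        exact ih [] [] acc acc' rfl hl
      · replace he : cur.isEmpty = false := by simpa using he
        rw [← hc, he]
        simp only [Bool.false_eq_true, if_false]
        exact ih [] [] (cur.reverse :: acc) (cur'.reverse :: acc') rfl (by simp [hl])
    · replace hsp : PySem.Chars.isspace a = false := by simpa using hsp
      simp only [hsp, Bool.false_eq_true, if_false]
      exact ih (a :: cur) (b :: cur') acc acc' (by simp) hl

lemma split₀_title_len (cs : List Char) :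
    (PySem.Chars.split₀ (pyTitle cs)).length = (PySem.Chars.split₀ cs).length := by
  exact split₀go_len (title_space_profile false cs) [] [] [] [] rfl rfl

-- ===== VERDICT (by name: the statement is the Claim_ definition above) =====
theorem demo_find_players_by_name_spec : Claim_equal_demo_find_players_by_name := by
  intro sn db mr _hdom hpre
  unfold Spec_demo_find_players_by_name
  unfold demo_find_players_by_name demo_find_players_by_name_alt
  dsimp only
  by_cases h1 : (PySem.Chars.split₀ (pyTitle (PySem.Chars.strip sn.toList))).length = 1
  · have hsw : ((PySem.Chars.split₀ (pyTitle (PySem.Chars.strip sn.toList))).length == 1) = true := by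
      simpa using h1
    have hne : ∀ p ∈ db, PySem.Chars.split₀ p.toList ≠ [] := by
      apply hpre
      rw [← split₀_title_len]
      exact h1
    rw [hsw]
    simp only [if_true]
    rw [PySem.List.foldl_append_if
        (fun player : String => PySem.Chars.lower player.toList == PySem.Chars.lower (pyTitle (PySem.Chars.strip sn.toList)))
        (fun player : String => [("full_name", player), ("match_type", "exact")]),
      pvA_surn (PySem.Chars.lower (pyTitle (PySem.Chars.strip sn.toList))) db hne,
      pvB_fold_true' (PySem.Chars.lower (pyTitle (PySem.Chars.strip sn.toList))) db hne [] [] []]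
    dsimp only
    rw [PySem.List.foldl_append_if
        (fun player : String => PySem.Chars.isIn (PySem.Chars.lower (pyTitle (PySem.Chars.strip sn.toList))) (PySem.Chars.lower player.toList))
        (fun player : String => [("full_name", player), ("match_type", "partial")])]
    simp only [List.nil_append, List.append_assoc]
    exact pvDedup_eq mr _ _ (pvKfp_three db _ _ _)
  · have hsw : ((PySem.Chars.split₀ (pyTitle (PySem.Chars.strip sn.toList))).length == 1) = false := by
      simpa using h1
    rw [hsw]
    simp only [Bool.false_eq_true, if_false]
    rw [PySem.List.foldl_append_if
        (fun player : String => PySem.Chars.lower player.toList == PySem.Chars.lower (pyTitle (PySem.Chars.strip sn.toList)))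
        (fun player : String => [("full_name", player), ("match_type", "exact")]),
      pvB_fold_false' (PySem.Chars.lower (pyTitle (PySem.Chars.strip sn.toList))) db [] [] []]
    dsimp only
    rw [PySem.List.foldl_append_if
        (fun player : String => PySem.Chars.isIn (PySem.Chars.lower (pyTitle (PySem.Chars.strip sn.toList))) (PySem.Chars.lower player.toList))
        (fun player : String => [("full_name", player), ("match_type", "partial")])]
    simp only [List.nil_append, List.append_assoc]
    have k3 := pvKfp_three db
      (fun x => PySem.Chars.lower x.toList == PySem.Chars.lower (pyTitle (PySem.Chars.strip sn.toList)))
      (fun _ => false)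
      (fun x => PySem.Chars.isIn (PySem.Chars.lower (pyTitle (PySem.Chars.strip sn.toList))) (PySem.Chars.lower x.toList))
    simp only [Bool.and_false, Bool.not_false, Bool.and_true, List.filter_false, List.map_nil,
      List.nil_append] at k3
    exact pvDedup_eq mr _ _ k3
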